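-- pv_equiv track=rewrite | github.com/sundar91/dsa | Arrays/nth-magic.py | solve
-- ===== SOURCE A (Python) =====
-- def solve(A):
--
--     pw = 1
--     s = 0
--     # since power of 5 only counts when bit is set example
--     # 5 (101) -> 5^3 + 5
--     while A > 0:
--         pw = pw * 5
--         if A & 1:
--             s += pw
--         A = A >> 1
--     return s
-- ===== SOURCE B (Python) =====
-- def solve(A):
--     if A <= 0:
--         return 0
--     return int(bin(A)[2:], 5) * 5
-- ===== Notes on version B (the rewrite author's own statement) =====
-- stated objective: simpler
-- what changed: Replaces the bit-by-bit loop accumulating powers of 5 with a closed-form base conversion: reinterpret A's binary digits as a base-5 numeral and multiply by 5.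
import Mathlib
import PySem

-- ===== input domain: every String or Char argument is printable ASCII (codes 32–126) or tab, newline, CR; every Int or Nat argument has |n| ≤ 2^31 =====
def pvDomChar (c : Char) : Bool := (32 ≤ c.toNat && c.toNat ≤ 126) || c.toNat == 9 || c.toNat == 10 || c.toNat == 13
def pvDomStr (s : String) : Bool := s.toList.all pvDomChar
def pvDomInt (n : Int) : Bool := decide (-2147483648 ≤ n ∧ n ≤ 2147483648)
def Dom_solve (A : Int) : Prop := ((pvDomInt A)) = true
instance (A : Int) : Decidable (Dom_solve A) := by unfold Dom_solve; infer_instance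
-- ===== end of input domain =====

-- B replaces A's bit-by-bit power-of-5 loop with a closed-form base conversion
-- (binary digits of A read as a base-5 numeral, times 5); objective: simpler.

-- ===== PORT A =====
-- while A > 0: pw *= 5; if A & 1: s += pw; A >>= 1
-- A & 1 is ported as A % 2 == 1 and A >> 1 as A // 2: exact on ints (Python's
-- & 1 / >> 1 coincide with floor mod/div by 2 on all ints).
def solveLoop (A pw s : Int) : Int :=
  if h : A > 0 then
    let pw' := pw * 5
    let s' := if PySem.Int.mod A 2 = 1 then s + pw' else s
    solveLoop (PySem.Int.floordiv A 2) pw' s'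
  else s
termination_by A.toNat
decreasing_by
  have h2 : PySem.Int.floordiv A 2 = A / 2 := PySem.Int.floordiv_eq_ediv_of_pos (by omega)
  rw [h2]; omega

def solve (A : Int) : Int := solveLoop A 1 0

-- ===== PORT B =====
-- bin(A)[2:] : the binary digits of A, most significant first (A > 0)
def binMSB (n : Nat) : List Int :=
  if n = 0 then [] else binMSB (n / 2) ++ [((n % 2 : Nat) : Int)]
termination_by n
decreasing_by omega

-- int(digits, 5): MSB-first base-5 parse (Horner fold)
def solve_alt (A : Int) : Int :=
  if A ≤ 0 then 0
  else ((binMSB A.toNat).foldl (fun acc d => acc * 5 + d) 0) * 5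

-- ===== PRECONDITION & SPEC =====
def Spec_solve (A : Int) (out : Int) : Prop := out = solve_alt A
instance (A : Int) (out : Int) : Decidable (Spec_solve A out) := by unfold Spec_solve; infer_instance

-- ===== CLAIM (what is proved, stated in full; the proofs are below) =====
def Claim_equal_solve : Prop := ∀ (A : Int), Dom_solve A → Spec_solve A (solve A)

-- ===== LEMMAS AND PROOFS =====

-- reference value: A's binary digits read LSB-first in base 5
def gval (n : Nat) : Int :=
  if n = 0 then 0 else ((n % 2 : Nat) : Int) + 5 * gval (n / 2)
termination_by n
decreasing_by omega

theorem solveLoop_eq (n : Nat) : ∀ pw s : Int, solveLoop (n : Int) pw s = s + pw * 5 * gval n := by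
  induction n using Nat.strong_induction_on with
  | _ n ih =>
    intro pw s
    by_cases h0 : n = 0
    · subst h0
      rw [solveLoop, gval]; simp
    · have hpos : (0 : Int) < (n : Int) := by exact_mod_cast Nat.pos_of_ne_zero h0
      rw [solveLoop]
      have hd : PySem.Int.floordiv (n : Int) 2 = ((n / 2 : Nat) : Int) := by
        exact_mod_cast PySem.Int.floordiv_natCast n 2
      have hm : PySem.Int.mod (n : Int) 2 = ((n % 2 : Nat) : Int) := by
        exact_mod_cast PySem.Int.mod_natCast n 2
      simp only [hpos, dif_pos, hd, hm]
      rw [show gval n = ((n % 2 : Nat) : Int) + 5 * gval (n / 2) from by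
        rw [gval, if_neg h0]]
      rw [ih (n / 2) (Nat.div_lt_self (Nat.pos_of_ne_zero h0) (by norm_num))]
      by_cases hb : n % 2 = 1
      · simp [hb]; ring
      · have hb0 : n % 2 = 0 := by omega
        simp [hb0]; ring

theorem foldl_binMSB (n : Nat) :
    ∀ a : Int, (binMSB n).foldl (fun acc d => acc * 5 + d) a
      = a * 5 ^ (binMSB n).length + gval n := by
  induction n using Nat.strong_induction_on with
  | _ n ih =>
    intro a
    by_cases h0 : n = 0
    · subst h0; rw [binMSB, gval]; simp
    · rw [binMSB, if_neg h0, gval, if_neg h0]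
      rw [List.foldl_append]
      rw [ih (n / 2) (Nat.div_lt_self (Nat.pos_of_ne_zero h0) (by norm_num))]
      simp [pow_succ]; ring

-- ===== VERDICT (by name: the statement is the Claim_ definition above) =====
theorem solve_spec : Claim_equal_solve := by
  intro A _
  unfold Spec_solve solve solve_alt
  by_cases h : A ≤ 0
  · rw [solveLoop, if_pos h]
    simp [not_lt.mpr h]
  · have hA : A = ((A.toNat : Nat) : Int) := by omega
    rw [if_neg h, hA, solveLoop_eq, foldl_binMSB]
    simp only [Int.toNat_natCast]
    ring
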